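-- pv_equiv track=rewrite | github.com/Maplx/iot-proj | smt_solver.py | _split_interval_to_supported
-- ===== SOURCE A (Python) =====
-- from typing import Dict, List, Tuple, Any
--
-- SUPPORTED_INTERVAL_MAX_NS = 20_971_200  # from testbed error "SupportedIntervalMax"
--
-- def _split_interval_to_supported(
--     duration_ns: int,
--     mask: int,
--     max_ns: int = SUPPORTED_INTERVAL_MAX_NS,
-- ) -> List[Tuple[int, int]]:
--     """
--     Split a (duration_ns, mask) pair into multiple entries so that
--     each duration <= max_ns. Keeps the same mask for all pieces.
--     """
--     parts: List[Tuple[int, int]] = []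
--     remaining = duration_ns
--     while remaining > max_ns:
--         parts.append((max_ns, mask))
--         remaining -= max_ns
--     if remaining > 0:
--         parts.append((remaining, mask))
--     return parts
-- ===== SOURCE B (Python) =====
-- SUPPORTED_INTERVAL_MAX_NS = 20_971_200
--
--
-- def _split_interval_to_supported(
--     duration_ns: int,
--     mask: int,
--     max_ns: int = SUPPORTED_INTERVAL_MAX_NS,
-- ):
--     if duration_ns <= 0:
--         return []
--     full, rem = divmod(duration_ns, max_ns)
--     parts = [(max_ns, mask)] * full
--     if rem > 0:
--         parts.append((rem, mask))
--     return parts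
-- ===== Notes on version B (the rewrite author's own statement) =====
-- stated objective: simpler
-- what changed: Replaces the subtract-one-chunk-per-iteration while-loop with a closed form: divmod gives the chunk count and remainder, list multiplication builds the full chunks at once.
import Mathlib
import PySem

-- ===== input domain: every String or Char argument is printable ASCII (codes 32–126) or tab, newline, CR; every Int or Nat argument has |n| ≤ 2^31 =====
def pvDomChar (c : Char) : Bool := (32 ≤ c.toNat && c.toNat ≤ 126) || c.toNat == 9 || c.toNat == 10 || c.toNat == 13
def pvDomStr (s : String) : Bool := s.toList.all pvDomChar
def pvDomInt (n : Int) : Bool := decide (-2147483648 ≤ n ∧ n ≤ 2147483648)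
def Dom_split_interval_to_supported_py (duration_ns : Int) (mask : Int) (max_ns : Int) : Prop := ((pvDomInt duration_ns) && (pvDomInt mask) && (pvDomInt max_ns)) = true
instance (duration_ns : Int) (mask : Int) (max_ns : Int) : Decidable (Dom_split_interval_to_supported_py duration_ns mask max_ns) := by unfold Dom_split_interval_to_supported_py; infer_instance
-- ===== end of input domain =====

-- B replaces A's chunk-by-chunk subtraction loop by a divmod closed form (simpler; same output).


-- ===== PORT A =====
-- the while-loop of A; the extra '0 < max_ns' in the dite condition only makes the
-- recursion total in Lean (in Python the loop diverges when max_ns ≤ 0 < remaining - max_ns…),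
-- it changes nothing on inputs satisfying Pre_ below
def pvALoop (max_ns mask remaining : Int) (parts : List (Int × Int)) : List (Int × Int) :=
  if h0 : 0 < max_ns ∧ max_ns < remaining then
    pvALoop max_ns mask (remaining - max_ns) (parts ++ [(max_ns, mask)])
  else if 0 < remaining then parts ++ [(remaining, mask)] else parts
termination_by remaining.toNat
decreasing_by omega

def split_interval_to_supported_py (duration_ns : Int) (mask : Int) (max_ns : Int) : List (Int × Int) :=
  pvALoop max_ns mask duration_ns []

-- ===== PORT B =====
def split_interval_to_supported_py_alt (duration_ns : Int) (mask : Int) (max_ns : Int) : List (Int × Int) :=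
  if duration_ns ≤ 0 then []
  else
    let full := PySem.Int.floordiv duration_ns max_ns
    let rem := PySem.Int.mod duration_ns max_ns
    let parts := List.replicate full.toNat (max_ns, mask)
    if 0 < rem then parts ++ [(rem, mask)] else parts

-- ===== PRECONDITION & SPEC =====
-- Pre_ excludes exactly the inputs on which A's while-loop never terminates
-- (max_ns ≤ 0 together with duration_ns > max_ns); A returns on every input admitted here.
def Pre_split_interval_to_supported_py (duration_ns : Int) (mask : Int) (max_ns : Int) : Prop :=
  0 < max_ns ∨ duration_ns ≤ max_ns
instance (duration_ns : Int) (mask : Int) (max_ns : Int) : Decidable (Pre_split_interval_to_supported_py duration_ns mask max_ns) := by unfold Pre_split_interval_to_supported_py; infer_instance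

def pvWitness_split_interval_to_supported_py : Int × Int × Int := (7, 3, 2)

def Spec_split_interval_to_supported_py (duration_ns : Int) (mask : Int) (max_ns : Int) (out : List (Int × Int)) : Prop := out = split_interval_to_supported_py_alt duration_ns mask max_ns
instance (duration_ns : Int) (mask : Int) (max_ns : Int) (out : List (Int × Int)) : Decidable (Spec_split_interval_to_supported_py duration_ns mask max_ns out) := by unfold Spec_split_interval_to_supported_py; infer_instance

-- ===== CLAIM (what is proved, stated in full; the proofs are below) =====
def Claim_equal_split_interval_to_supported_py : Prop := ∀ (duration_ns : Int) (mask : Int) (max_ns : Int), Dom_split_interval_to_supported_py duration_ns mask max_ns → Pre_split_interval_to_supported_py duration_ns mask max_ns → Spec_split_interval_to_supported_py duration_ns mask max_ns (split_interval_to_supported_py duration_ns mask max_ns)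

-- ===== LEMMAS AND PROOFS =====

-- B's closed form unrolls one chunk when more than one chunk is needed
lemma alt_unroll (mask : Int) {m r : Int} (hm : 0 < m) (hr : m < r) :
    split_interval_to_supported_py_alt r mask m
      = (m, mask) :: split_interval_to_supported_py_alt (r - m) mask m := by
  have h1 : ¬ r ≤ 0 := by omega
  have h2 : ¬ r - m ≤ 0 := by omega
  simp only [split_interval_to_supported_py_alt, h1, h2, if_false,
    PySem.Int.floordiv_eq_ediv_of_pos hm, PySem.Int.mod_eq_emod_of_pos hm]
  have hdiv : (r - m) / m = r / m - 1 := by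
    have := Int.add_mul_ediv_right r (-1) (by omega : m ≠ 0)
    simpa [sub_eq_add_neg, neg_mul] using this
  have hmod : (r - m) % m = r % m := Int.sub_emod_right r m
  have hq : 1 ≤ r / m := by
    rw [Int.le_ediv_iff_mul_le hm]; omega
  have hrep : (r / m).toNat = ((r - m) / m).toNat + 1 := by
    rw [hdiv]; omega
  rw [hmod, hrep, List.replicate_succ]
  split <;> simp

-- B's closed form on the last (or only) chunk
lemma alt_last (mask : Int) {m r : Int} (hm : 0 < m) (hr : r ≤ m) :
    split_interval_to_supported_py_alt r mask m
      = if 0 < r then [(r, mask)] else [] := by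
  by_cases h0 : r ≤ 0
  · simp [split_interval_to_supported_py_alt, h0]
  · have hpos : 0 < r := by omega
    simp only [split_interval_to_supported_py_alt, h0, if_false, hpos, if_true,
      PySem.Int.floordiv_eq_ediv_of_pos hm, PySem.Int.mod_eq_emod_of_pos hm]
    by_cases heq : r = m
    · subst heq
      have hd : r / r = 1 := Int.ediv_self (by omega)
      simp [hd, Int.emod_self]
    · have hlt : r < m := by omega
      have hd : r / m = 0 := Int.ediv_eq_zero_of_lt (by omega) hlt
      have hmd : r % m = r := Int.emod_eq_of_lt (by omega) hlt
      simp [hd, hmd, hpos]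

-- A's loop computes B's closed form (appended to the accumulator), for 0 < max_ns
lemma aLoop_eq_alt (m mask : Int) (hm : 0 < m) :
    ∀ (n : Nat) (r : Int), r.toNat ≤ n → ∀ (parts : List (Int × Int)),
      pvALoop m mask r parts = parts ++ split_interval_to_supported_py_alt r mask m := by
  intro n
  induction n with
  | zero =>
    intro r hr parts
    have hrle : r ≤ 0 := by omega
    rw [pvALoop]
    have hc : ¬ (0 < m ∧ m < r) := by omega
    rw [dif_neg hc, if_neg (by omega : ¬ 0 < r)]
    simp [split_interval_to_supported_py_alt, hrle]
  | succ n ih =>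
    intro r hr parts
    rw [pvALoop]
    by_cases h : m < r
    · rw [dif_pos ⟨hm, h⟩, ih (r - m) (by omega), alt_unroll mask hm h]
      simp
    · rw [dif_neg (by omega : ¬ (0 < m ∧ m < r)), alt_last mask hm (by omega)]
      split <;> simp

-- ===== VERDICT (by name: the statement is the Claim_ definition above) =====
theorem split_interval_to_supported_py_spec : Claim_equal_split_interval_to_supported_py := by
  intro d mask m _hdom hpre
  unfold Spec_split_interval_to_supported_py split_interval_to_supported_py
  rcases hpre with hm | hle
  · simpa using (aLoop_eq_alt m mask hm d.toNat d le_rfl [])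
  · by_cases hm : 0 < m
    · simpa using (aLoop_eq_alt m mask hm d.toNat d le_rfl [])
    · have hd : d ≤ 0 := by omega
      rw [pvALoop, dif_neg (by omega : ¬ (0 < m ∧ m < d)), if_neg (by omega : ¬ 0 < d)]
      simp [split_interval_to_supported_py_alt, hd]
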